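-- pv_equiv track=rewrite | github.com/rajputabhishek001/practice | max_count_freq.py | mx_fre
-- ===== SOURCE A (Python) =====
-- def mx_fre(arr):
--     dp = {}
--     ans=0
--     for element in arr:
--         if element in dp:
--             dp[element] += 1
--         else:
--             dp[element] = 1
--     if not dp:
--         return 0
--     mx = max(dp.values())
--     for i in dp.values():
--         if i == mx:
--             ans+=mx
--     return ans
-- ===== SOURCE B (Python) =====
-- def mx_fre(arr):
--     runs = []          # lengths of maximal runs of equal elements in sorted(arr)
--     prev = None
--     length = 0
--     for x in sorted(arr):
--         if length > 0 and x == prev: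
--             length += 1
--         else:
--             if length > 0:
--                 runs.append(length)
--             prev = x
--             length = 1
--     if length > 0:
--         runs.append(length)
--     if not runs:
--         return 0
--     mx = max(runs)
--     return mx * runs.count(mx)
-- ===== Notes on version B (the rewrite author's own statement) =====
-- stated objective: alternative
-- what changed: Replaces A's hash-map counting plus dict-values scan with a sort-and-group pass: sort the list, collect the lengths of maximal runs of equal elements, then return max run length times the number of runs attaining it.
import Mathlib
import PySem

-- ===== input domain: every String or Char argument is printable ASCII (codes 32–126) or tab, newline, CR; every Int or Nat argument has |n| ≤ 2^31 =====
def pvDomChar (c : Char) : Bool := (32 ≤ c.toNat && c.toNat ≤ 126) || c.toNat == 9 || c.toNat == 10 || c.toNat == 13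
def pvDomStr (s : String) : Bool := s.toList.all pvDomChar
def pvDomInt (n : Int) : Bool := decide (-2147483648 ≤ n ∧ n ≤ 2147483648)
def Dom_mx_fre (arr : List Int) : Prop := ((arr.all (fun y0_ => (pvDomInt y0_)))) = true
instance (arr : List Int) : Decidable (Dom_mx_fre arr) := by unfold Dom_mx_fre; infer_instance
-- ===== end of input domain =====

-- B sorts the input and counts lengths of maximal equal runs in one grouped pass (sort+group) instead of hashing into a dict and scanning its values; alternative algorithm, not claimed faster.


-- ===== PORT A =====
def mx_fre (arr : List Int) : Int :=
  let dp : PySem.Dict Int Int :=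
    arr.foldl (fun d e => if d.contains e then d.modify e 0 (· + 1) else d.insert e 1)
      PySem.Dict.empty
  if dp.size = 0 then 0
  else
    match PySem.List.max? dp.values (fun y => y) with
    | none => 0   -- unreachable: dp is nonempty here, so max over its values exists
    | some mx => dp.values.foldl (fun ans i => if i = mx then ans + mx else ans) 0

-- ===== PORT B =====
-- the 'for x in sorted(arr)' loop of Source B: state = (prev, length), emitting finished run lengths
def pvRunsGo (prev len : Int) : List Int → List Int
  | [] => [len]
  | y :: t => if y = prev then pvRunsGo prev (len + 1) t else len :: pvRunsGo y 1 t

def pvRuns : List Int → List Int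
  | [] => []
  | x :: t => pvRunsGo x 1 t

def mx_fre_alt (arr : List Int) : Int :=
  let s := PySem.List.sorted arr (fun y => y) false
  let runs := pvRuns s
  match PySem.List.max? runs (fun y => y) with
  | none => 0   -- runs is empty exactly when arr is empty: Source B returns 0
  | some mx => mx * (runs.count mx)

-- ===== PRECONDITION & SPEC =====
def Spec_mx_fre (arr : List Int) (out : Int) : Prop := out = mx_fre_alt arr
instance (arr : List Int) (out : Int) : Decidable (Spec_mx_fre arr out) := by unfold Spec_mx_fre; infer_instance

-- ===== CLAIM (what is proved, stated in full; the proofs are below) =====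
def Claim_equal_mx_fre : Prop := ∀ (arr : List Int), Dom_mx_fre arr → Spec_mx_fre arr (mx_fre arr)

-- ===== LEMMAS AND PROOFS =====

-- the common shape both sides reduce to: max of the counts times its multiplicity
def pvF (l : List Int) : Int :=
  match PySem.List.max? l (fun y => y) with
  | none => 0
  | some mx => mx * (l.count mx)

-- first element of every maximal run of a sorted list (proof-only helper)
def pvHeads : List Int → List Int
  | [] => []
  | x :: t => x :: pvHeads (t.dropWhile (· == x))
termination_by l => l.length
decreasing_by simpa using Nat.lt_succ_of_le (List.length_dropWhile_le _ _)

-- ---- A-side: the dict loop is Counter, the value loop sums mx over maximal entries ----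
theorem mx_fre_dp_eq_counter (arr : List Int) :
    arr.foldl (fun d e => if d.contains e then d.modify e 0 (· + 1) else d.insert e 1)
      PySem.Dict.empty = PySem.Dict.counter arr := by
  rw [← PySem.Dict.foldl_insert_getD_add_one_eq_counter]
  apply PySem.List.foldl_congr_mem
  intro d e _
  by_cases h : d.contains e = true
  · simp [h]
    rfl
  · have hnone : d.get? e = none := (PySem.Dict.get?_eq_none_iff_contains d e).mpr
      (by simpa using h)
    simp [h, PySem.Dict.getD, hnone]

theorem mx_fre_sum_loop (l : List Int) (m a : Int) :
    l.foldl (fun ans i => if i = m then ans + m else ans) a = a + m * (l.count m : Int) := by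
  induction l generalizing a with
  | nil => simp
  | cons x t ih =>
    by_cases h : x = m
    · simp [h, ih]
      ring
    · simp [List.foldl_cons, ih, h]

theorem mx_fre_eq_F (arr : List Int) :
    mx_fre arr = pvF ((PySem.Set.ofList arr).map (fun k => (arr.count k : Int))) := by
  unfold mx_fre
  rw [mx_fre_dp_eq_counter]
  have hvals : (PySem.Dict.counter arr).values
      = (PySem.Set.ofList arr).map (fun k => ((arr.count k : Int))) := by
    show ((PySem.Dict.counter arr).items.map (·.2))
        = (PySem.Set.ofList arr).map (fun k => ((arr.count k : Int)))
    rw [PySem.Dict.items_counter]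
    simp
  have hsize : (PySem.Dict.counter arr).size = (PySem.Set.ofList arr).length := by
    show (PySem.Dict.counter arr).items.length = _
    rw [PySem.Dict.items_counter]; simp
  rcases arr with _ | ⟨x, t⟩
  · simp [PySem.Dict.counter, PySem.Dict.size, PySem.Dict.empty]
    decide
  · have hmem : x ∈ PySem.Set.ofList (x :: t) :=
      (PySem.Set.mem_ofList _ x).mpr (List.mem_cons_self ..)
    have hne : PySem.Set.ofList (x :: t) ≠ [] := by
      intro h; rw [h] at hmem; exact absurd hmem (List.not_mem_nil)
    have hszne : (PySem.Dict.counter (x :: t)).size ≠ 0 := by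
      rw [hsize]; simpa [List.length_eq_zero_iff] using hne
    rw [if_neg hszne, hvals]
    unfold pvF
    rcases hM : PySem.List.max? ((PySem.Set.ofList (x :: t)).map (fun k => ((x :: t).count k : Int)))
        (fun y => y) with _ | mx
    · exact absurd (by simpa [List.map_eq_nil_iff] using
        (PySem.List.max?_eq_none_iff _ _).mp hM) hne
    · simp only [mx_fre_sum_loop]
      ring

-- ---- pvF depends only on the multiset of its argument ----
theorem pvF_perm {l1 l2 : List Int} (h : l1.Perm l2) : pvF l1 = pvF l2 := by
  unfold pvF
  rcases h1 : PySem.List.max? l1 (fun y => y) with _ | m1 <;>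
    rcases h2 : PySem.List.max? l2 (fun y => y) with _ | m2
  · rfl
  · have e1 : l1 = [] := (PySem.List.max?_eq_none_iff _ _).mp h1
    subst e1
    have e2 : l2 = [] := h.symm.eq_nil
    rw [(PySem.List.max?_eq_none_iff l2 _).mpr e2] at h2
    cases h2
  · have e2 : l2 = [] := (PySem.List.max?_eq_none_iff _ _).mp h2
    subst e2
    have e1 : l1 = [] := h.eq_nil
    rw [(PySem.List.max?_eq_none_iff l1 _).mpr e1] at h1
    cases h1
  · have hm : m1 = m2 := by
      have h12 : m1 ≤ m2 := PySem.List.max?_isMax h2 m1 (h.mem_iff.mp (PySem.List.max?_mem h1))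
      have h21 : m2 ≤ m1 := PySem.List.max?_isMax h1 m2 (h.mem_iff.mpr (PySem.List.max?_mem h2))
      omega
    subst hm
    simp only [h.count_eq]

-- ---- B-side: the run loop over a sorted list yields the counts of its distinct heads ----
theorem pvRunsGo_spec (t : List Int) (prev : Int) : ∀ c : Int,
    pvRunsGo prev c t
      = (c + ((t.takeWhile (· == prev)).length : Int)) :: pvRuns (t.dropWhile (· == prev)) := by
  induction t with
  | nil => intro c; simp [pvRunsGo, pvRuns]
  | cons y t ih =>
    intro c
    by_cases h : y = prev
    · rw [pvRunsGo, if_pos h, ih (c + 1)]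
      simp [h]
      omega
    · rw [pvRunsGo, if_neg h]
      simp [h, pvRuns]

-- every element of the suffix after the first run of a sorted list is strictly above its head
theorem pvDrop_gt (x : Int) (t : List Int) (hs : (x :: t).Pairwise (· ≤ ·)) :
    ∀ z ∈ t.dropWhile (· == x), x < z := by
  rcases List.pairwise_cons.mp hs with ⟨hx, ht⟩
  rcases hr : t.dropWhile (· == x) with _ | ⟨y, r'⟩
  · simp
  · have hymem : y ∈ t := (List.dropWhile_sublist (p := (· == x))).subset (by rw [hr]; exact List.mem_cons_self ..)
    have hy : ¬ (y == x) = true := by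
      have h0 := List.head?_dropWhile_not (· == x) t
      rw [hr] at h0
      simp only [List.head?_cons] at h0
      simp [h0]
    have hyne : y ≠ x := by
      intro e; exact hy (by simp [e])
    have hxy : x < y := lt_of_le_of_ne (hx y hymem) (Ne.symm hyne)
    have hrp : (y :: r').Pairwise (· ≤ ·) := by
      rw [← hr]; exact ht.sublist (List.dropWhile_sublist _)
    intro z hz
    rcases List.mem_cons.mp hz with rfl | hz'
    · exact hxy
    · exact lt_of_lt_of_le hxy ((List.pairwise_cons.mp hrp).1 z hz')

theorem pvTake_eq (x : Int) (t : List Int) : ∀ z ∈ t.takeWhile (· == x), z = x := by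
  intro z hz
  simpa using List.mem_takeWhile_imp hz

theorem pvHeads_subset : ∀ s : List Int, ∀ y ∈ pvHeads s, y ∈ s := by
  intro s
  induction s using pvHeads.induct with
  | case1 => simp [pvHeads]
  | case2 x t ih =>
    intro y hy
    rw [pvHeads] at hy
    rcases List.mem_cons.mp hy with rfl | hy'
    · exact List.mem_cons_self ..
    · exact List.mem_cons_of_mem _ ((List.dropWhile_sublist _).subset (ih y hy'))

theorem pvHeads_mem : ∀ s : List Int, s.Pairwise (· ≤ ·) → ∀ y, y ∈ pvHeads s ↔ y ∈ s := by
  intro s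
  induction s using pvHeads.induct with
  | case1 => simp [pvHeads]
  | case2 x t ih =>
    intro hs y
    constructor
    · exact pvHeads_subset _ y
    · intro hy
      rw [pvHeads]
      rcases List.mem_cons.mp hy with rfl | hy'
      · exact List.mem_cons_self ..
      · have hsplit : y ∈ t.takeWhile (· == x) ∨ y ∈ t.dropWhile (· == x) := by
          have := List.takeWhile_append_dropWhile (p := (· == x)) (l := t)
          rw [← List.mem_append, this]; exact hy'
        rcases hsplit with h1 | h2
        · rw [pvTake_eq x t y h1]; exact List.mem_cons_self ..
        · have hrp : (t.dropWhile (· == x)).Pairwise (· ≤ ·) :=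
            (List.pairwise_cons.mp hs).2.sublist (List.dropWhile_sublist _)
          exact List.mem_cons_of_mem _ ((ih hrp y).mpr h2)

theorem pvHeads_pairwise_lt : ∀ s : List Int, s.Pairwise (· ≤ ·) → (pvHeads s).Pairwise (· < ·) := by
  intro s
  induction s using pvHeads.induct with
  | case1 => intro _; simp [pvHeads]
  | case2 x t ih =>
    intro hs
    rw [pvHeads]
    have hrp : (t.dropWhile (· == x)).Pairwise (· ≤ ·) :=
      (List.pairwise_cons.mp hs).2.sublist (List.dropWhile_sublist _)
    refine List.pairwise_cons.mpr ⟨?_, ih hrp⟩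
    intro y hy
    exact pvDrop_gt x t hs y (pvHeads_subset _ y hy)

theorem pvRuns_sorted_eq : ∀ s : List Int, s.Pairwise (· ≤ ·) →
    pvRuns s = (pvHeads s).map (fun k => (s.count k : Int)) := by
  intro s
  induction s using pvHeads.induct with
  | case1 => intro _; simp [pvRuns, pvHeads]
  | case2 x t ih =>
    intro hs
    have hgt := pvDrop_gt x t hs
    have hrp : (t.dropWhile (· == x)).Pairwise (· ≤ ·) :=
      (List.pairwise_cons.mp hs).2.sublist (List.dropWhile_sublist _)
    have hsplit : t = t.takeWhile (· == x) ++ t.dropWhile (· == x) :=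
      (List.takeWhile_append_dropWhile ..).symm
    have hcount_a : ∀ k, k ≠ x → (t.takeWhile (· == x)).count k = 0 := by
      intro k hk
      rw [List.count_eq_zero]
      intro hmem
      exact hk (pvTake_eq x t k hmem)
    have hcount_x_r : (t.dropWhile (· == x)).count x = 0 := by
      rw [List.count_eq_zero]
      intro hmem
      exact lt_irrefl x (hgt x hmem)
    have hcount_x : (x :: t).count x = 1 + (t.takeWhile (· == x)).length := by
      rw [List.count_cons_self]
      conv_lhs => rw [hsplit]
      rw [List.count_append, hcount_x_r]
      have : (t.takeWhile (· == x)).count x = (t.takeWhile (· == x)).length := by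
        rw [List.count_eq_length]
        intro b hb
        exact (pvTake_eq x t b hb).symm
      omega
    rw [pvRuns, pvRunsGo_spec, pvHeads, List.map_cons, ih hrp]
    congr 1
    · rw [hcount_x]; push_cast; ring
    · apply List.map_congr_left
      intro k hk
      have hkr : k ∈ t.dropWhile (· == x) := pvHeads_subset _ k hk
      have hkx : k ≠ x := by
        intro hkx; rw [hkx] at hkr; exact lt_irrefl x (hgt x hkr)
      congr 1
      have hct : List.count k (x :: t) = List.count k t := by
        simp [List.count_cons]
        omega
      rw [hct]
      conv_rhs => rw [hsplit]
      rw [List.count_append, hcount_a k hkx]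
      omega

theorem mx_fre_alt_eq_F (arr : List Int) :
    mx_fre_alt arr = pvF ((PySem.Set.ofList arr).map (fun k => (arr.count k : Int))) := by
  have hp : (PySem.List.sorted arr (fun y => y) false).Perm arr := PySem.List.sorted_perm ..
  have hsort : (PySem.List.sorted arr (fun y => y) false).Pairwise (· ≤ ·) :=
    PySem.List.sorted_pairwise ..
  show pvF (pvRuns (PySem.List.sorted arr (fun y => y) false)) = _
  rw [pvRuns_sorted_eq _ hsort]
  have hcfun : ∀ k, ((PySem.List.sorted arr (fun y => y) false).count k : Int) = (arr.count k : Int) := by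
    intro k; rw [hp.count_eq]
  apply pvF_perm
  have hmap : (pvHeads (PySem.List.sorted arr (fun y => y) false)).map
      (fun k => ((PySem.List.sorted arr (fun y => y) false).count k : Int))
      = (pvHeads (PySem.List.sorted arr (fun y => y) false)).map (fun k => (arr.count k : Int)) := by
    apply List.map_congr_left; intro k _; exact hcfun k
  rw [hmap]
  apply List.Perm.map
  rw [List.perm_ext_iff_of_nodup
    ((pvHeads_pairwise_lt _ hsort).imp ne_of_lt)
    (PySem.Set.nodup_ofList arr)]
  intro a
  rw [pvHeads_mem _ hsort, PySem.Set.mem_ofList]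
  exact hp.mem_iff

-- ===== VERDICT (by name: the statement is the Claim_ definition above) =====
theorem mx_fre_spec : Claim_equal_mx_fre := by
  intro arr _
  show _ = _
  rw [mx_fre_eq_F, mx_fre_alt_eq_F]
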